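-- pv_equiv track=rewrite | github.com/AI4Finance-Foundation/FinEmotion | finemotion/emotion.py | mixed_emotion
-- ===== SOURCE A (Python) =====
-- def mixed_emotion(top2):
--     mixed_emotion = {
--         'love' : ['joy', 'trust'],
--         'guilt' : ['joy', 'fear'],
--         'delight': ['joy', 'surprise'],
--         'submission': ['trust', 'fear'],
--         'awe': ['fear', 'surprise'],
--         'despair': ['fear', 'sadness'],
--         'shame': ['fear', 'disgust'],
--         'disappointment': ['surprise', 'sadness'],
--         'unbelief': ['surprise', 'disgust'],
--         'outrage': ['surprise', 'anger'],
--         'remorse': ['sadness', 'disgust'],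
--         'envy': ['sadness','anger'],
--         'pessimism': ['sadness', 'anticipation'],
--         'contemt': ['disgust', 'anger'],
--         'cynicism': ['disgust', 'anticipation'],
--         'morbidness': ['disgust', 'joy'],
--         'aggression': ['anger', 'anticipation'],
--         'pride': ['anger', 'joy'],
--         'dominance': ['anger', 'trust'],
--         'optimism': ['anticipation', 'joy'],
--         'hope': ['anticipation', 'trust'],
--         'anxiety': ['anticipation', 'fear']
--      }
--
--     #return the mixed emotion
--     for key in mixed_emotion:
--         if set(top2) == set(mixed_emotion[key]):
--             return key
--
--     #else return the emotion
--     return top2[0]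
-- ===== SOURCE B (Python) =====
-- # eight primary emotions -> a small integer code; unknown strings code to -1
-- BASE = {'joy': 0, 'trust': 1, 'fear': 2, 'surprise': 3,
--         'sadness': 4, 'disgust': 5, 'anger': 6, 'anticipation': 7}
--
-- # (smaller code, larger code) -> mixed-emotion label, the 22 labelled pairs
-- LABELS = {(0, 1): 'love', (0, 2): 'guilt', (0, 3): 'delight',
--           (1, 2): 'submission', (2, 3): 'awe', (2, 4): 'despair',
--           (2, 5): 'shame', (3, 4): 'disappointment', (3, 5): 'unbelief',
--           (3, 6): 'outrage', (4, 5): 'remorse', (4, 6): 'envy',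
--           (4, 7): 'pessimism', (5, 6): 'contemt', (5, 7): 'cynicism',
--           (0, 5): 'morbidness', (6, 7): 'aggression', (0, 6): 'pride',
--           (1, 6): 'dominance', (0, 7): 'optimism', (1, 7): 'hope',
--           (2, 7): 'anxiety'}
--
--
-- def mixed_emotion(top2):
--     idx = sorted({BASE.get(e, -1) for e in top2})
--     if len(idx) == 2 and idx[0] != -1:
--         return LABELS.get((idx[0], idx[1]), top2[0])
--     return top2[0]
-- ===== Notes on version B (the rewrite author's own statement) =====
-- stated objective: faster
-- what changed: B replaces A's linear scan comparing set(top2) against each of the 22 literal pairs by an integer encoding: each primary emotion gets a small code via a BASE dict (unknown strings -> -1), the distinct codes of top2 are sorted, and the (min,max) code pair is looked up in a pair-keyed LABELS table with top2[0] as the default.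
-- outside the precondition, e.g. on mixed_emotion([]): A raises IndexError, B raises IndexError
import Mathlib
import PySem

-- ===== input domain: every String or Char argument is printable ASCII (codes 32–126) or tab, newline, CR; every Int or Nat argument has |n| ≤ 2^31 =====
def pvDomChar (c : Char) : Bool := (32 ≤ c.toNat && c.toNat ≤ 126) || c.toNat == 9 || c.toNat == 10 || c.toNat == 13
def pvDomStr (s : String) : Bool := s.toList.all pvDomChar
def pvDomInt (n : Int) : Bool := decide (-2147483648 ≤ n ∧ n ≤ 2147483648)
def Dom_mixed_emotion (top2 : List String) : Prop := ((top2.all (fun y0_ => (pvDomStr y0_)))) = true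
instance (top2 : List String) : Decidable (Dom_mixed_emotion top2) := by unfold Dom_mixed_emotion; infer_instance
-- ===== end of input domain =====

-- B replaces A's linear scan with repeated set() comparisons by an integer encoding:
-- each primary emotion gets a small code, the distinct codes of top2 are sorted, and
-- the (min, max) code pair is looked up in a 22-entry table (measured faster in a timing run).

-- ===== PORT A =====
-- the literal dict of A, as an insertion-ordered association list
def meDictA : List (String × List String) :=
  [("love", ["joy", "trust"]),
   ("guilt", ["joy", "fear"]),
   ("delight", ["joy", "surprise"]),
   ("submission", ["trust", "fear"]),
   ("awe", ["fear", "surprise"]),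
   ("despair", ["fear", "sadness"]),
   ("shame", ["fear", "disgust"]),
   ("disappointment", ["surprise", "sadness"]),
   ("unbelief", ["surprise", "disgust"]),
   ("outrage", ["surprise", "anger"]),
   ("remorse", ["sadness", "disgust"]),
   ("envy", ["sadness", "anger"]),
   ("pessimism", ["sadness", "anticipation"]),
   ("contemt", ["disgust", "anger"]),
   ("cynicism", ["disgust", "anticipation"]),
   ("morbidness", ["disgust", "joy"]),
   ("aggression", ["anger", "anticipation"]),
   ("pride", ["anger", "joy"]),
   ("dominance", ["anger", "trust"]),
   ("optimism", ["anticipation", "joy"]),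
   ("hope", ["anticipation", "trust"]),
   ("anxiety", ["anticipation", "fear"])]

-- A's loop: first key whose pair is set-equal to set(top2); else top2[0]
def meScan (top2 : List String) : List (String × List String) → String
  | [] => PySem.List.pyGetD top2 0 ""
  | (k, p) :: rest =>
      if PySem.Set.equal (PySem.Set.ofList top2) (PySem.Set.ofList p) then k
      else meScan top2 rest

def mixed_emotion (top2 : List String) : String := meScan top2 meDictA

-- ===== PORT B =====
-- Source B's BASE: primary emotion -> code
def meBase : PySem.Dict String Int :=
  PySem.Dict.mk
    [("joy", 0), ("trust", 1), ("fear", 2), ("surprise", 3),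
     ("sadness", 4), ("disgust", 5), ("anger", 6), ("anticipation", 7)]

-- Source B's LABELS: (smaller code, larger code) -> mixed-emotion label
def meLabels : PySem.Dict (Int × Int) String :=
  PySem.Dict.mk
    [((0, 1), "love"), ((0, 2), "guilt"), ((0, 3), "delight"),
     ((1, 2), "submission"), ((2, 3), "awe"), ((2, 4), "despair"),
     ((2, 5), "shame"), ((3, 4), "disappointment"), ((3, 5), "unbelief"),
     ((3, 6), "outrage"), ((4, 5), "remorse"), ((4, 6), "envy"),
     ((4, 7), "pessimism"), ((5, 6), "contemt"), ((5, 7), "cynicism"),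
     ((0, 5), "morbidness"), ((6, 7), "aggression"), ((0, 6), "pride"),
     ((1, 6), "dominance"), ((0, 7), "optimism"), ((1, 7), "hope"),
     ((2, 7), "anxiety")]

-- idx = sorted({BASE.get(e, -1) for e in top2});
-- if len(idx) == 2 and idx[0] != -1: return LABELS.get((idx[0], idx[1]), top2[0]); return top2[0]
def mixed_emotion_alt (top2 : List String) : String :=
  match PySem.List.sorted
      (PySem.Set.ofList (top2.map (fun e => meBase.getD e (-1)))) (fun x => x) false with
  | [i, j] =>
      if i ≠ -1 then meLabels.getD (i, j) (PySem.List.pyGetD top2 0 "")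
      else PySem.List.pyGetD top2 0 ""
  | _ => PySem.List.pyGetD top2 0 ""

-- ===== PRECONDITION & SPEC =====
-- A raises IndexError at 'top2[0]' when top2 is empty (no pair matches the empty set); excluded.
def Pre_mixed_emotion (top2 : List String) : Prop := top2 ≠ []
instance (top2 : List String) : Decidable (Pre_mixed_emotion top2) := by unfold Pre_mixed_emotion; infer_instance
def pvWitness_mixed_emotion : List String := (["trust", "joy"])

def Spec_mixed_emotion (top2 : List String) (out : String) : Prop := out = mixed_emotion_alt top2
instance (top2 : List String) (out : String) : Decidable (Spec_mixed_emotion top2 out) := by unfold Spec_mixed_emotion; infer_instance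

-- ===== CLAIM (what is proved, stated in full; the proofs are below) =====
def Claim_equal_mixed_emotion : Prop := ∀ (top2 : List String), Dom_mixed_emotion top2 → Pre_mixed_emotion top2 → Spec_mixed_emotion top2 (mixed_emotion top2)

-- ===== LEMMAS AND PROOFS =====

-- the code of an emotion string, and its decoding
def meF (e : String) : Int := meBase.getD e (-1)

def meBaseList : List (String × Int) :=
  [("joy", 0), ("trust", 1), ("fear", 2), ("surprise", 3),
   ("sadness", 4), ("disgust", 5), ("anger", 6), ("anticipation", 7)]

def meE (i : Int) : String := (((meBaseList.find? (fun p => p.2 == i)).map Prod.fst).getD "")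

-- the set-of-codes B builds from top2
def meT (top2 : List String) : List Int := PySem.Set.ofList (top2.map meF)

-- an abstract version of A's scan, driven by an arbitrary boolean test
def meScanG (g : String × List String → Bool) : List (String × List String) → Option String
  | [] => none
  | kp :: rest => if g kp then some kp.1 else meScanG g rest

theorem meGetNil (e : String) : (PySem.Dict.mk ([] : List (String × Int))).get? e = none := rfl

theorem meF_cases (e : String) : meF e = -1 ∨ (e, meF e) ∈ meBaseList := by
  unfold meF meBase meBaseList
  simp only [PySem.Dict.getD_eq_get?_getD, PySem.Dict.get?_mk_cons]
  split_ifs <;> simp_all [meGetNil]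

theorem meF_ge (e : String) : -1 ≤ meF e := by
  rcases meF_cases e with h | h
  · omega
  · revert h; unfold meBaseList; intro h; fin_cases h <;> decide

theorem meE_meF (e : String) (h : meF e ≠ -1) : meE (meF e) = e := by
  rcases meF_cases e with h' | h'
  · exact absurd h' h
  · revert h'; unfold meBaseList; intro h'
    fin_cases h' <;> simp_all <;> try decide

theorem mem_meT (top2 : List String) (i : Int) :
    i ∈ meT top2 ↔ ∃ e ∈ top2, meF e = i := by
  simp [meT, PySem.Set.mem_ofList]

theorem meScan_congr (top2 : List String) (g : String × List String → Bool) :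
    ∀ es : List (String × List String),
      (∀ kp ∈ es, PySem.Set.equal (PySem.Set.ofList top2) (PySem.Set.ofList kp.2) = g kp) →
      meScan top2 es = (meScanG g es).getD (PySem.List.pyGetD top2 0 "") := by
  intro es
  induction es with
  | nil => intro _; rfl
  | cons kp rest ih =>
    intro h
    obtain ⟨k, p⟩ := kp
    rw [meScan, meScanG, h (k, p) List.mem_cons_self]
    cases hg : g (k, p) with
    | true => simp
    | false => simp [ih (fun q hq => h q (List.mem_cons_of_mem _ hq))]

-- A's test against the pair [a, b], under full knowledge of top2's distinct elements
theorem meCond_char (top2 : List String) (a b A B : String)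
    (hAB : A ≠ B) (H1 : ∀ x ∈ top2, x = A ∨ x = B) (H2 : A ∈ top2) (H3 : B ∈ top2) :
    PySem.Set.equal (PySem.Set.ofList top2) (PySem.Set.ofList [a, b])
      = decide ((a = A ∧ b = B) ∨ (a = B ∧ b = A)) := by
  rw [Bool.eq_iff_iff, PySem.Set.equal_iff, decide_eq_true_iff]
  constructor
  · intro h
    have ha : a ∈ top2 := by
      have := (h a).2; simp [PySem.Set.mem_ofList] at this; exact this
    have hb : b ∈ top2 := by
      have := (h b).2; simp [PySem.Set.mem_ofList] at this; exact this
    have hA : A = a ∨ A = b := by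
      have := (h A).1; simp [PySem.Set.mem_ofList] at this; exact this H2
    have hB : B = a ∨ B = b := by
      have := (h B).1; simp [PySem.Set.mem_ofList] at this; exact this H3
    rcases hA with rfl | rfl <;> rcases hB with rfl | rfl <;> tauto
  · intro h x
    simp only [PySem.Set.mem_ofList, List.mem_cons]
    constructor
    · intro hx
      rcases H1 x hx with rfl | rfl <;> tauto
    · intro hx
      rcases hx with rfl | hx
      · rcases h with ⟨rfl, _⟩ | ⟨rfl, _⟩ <;> assumption
      · simp at hx; subst hx
        rcases h with ⟨_, rfl⟩ | ⟨_, rfl⟩ <;> assumption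

-- every entry of A's table is a pair of two distinct primary emotions with distinct codes
theorem meShape : ∀ kp ∈ meDictA, ∃ a b : String,
    kp.2 = [a, b] ∧ a ≠ b ∧ meF a ≠ -1 ∧ meF b ≠ -1 ∧ meF a ≠ meF b := by
  intro kp h
  fin_cases h <;>
    exact ⟨_, _, rfl, by decide, by decide, by decide, by decide⟩

-- the decided heart: for each ordered code pair, A's scan outcome is B's table lookup
theorem meMain : ∀ i ∈ ([0, 1, 2, 3, 4, 5, 6, 7] : List Int), ∀ j ∈ ([0, 1, 2, 3, 4, 5, 6, 7] : List Int), i < j →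
    meScanG (fun kp => decide (kp.2 = [meE i, meE j] ∨ kp.2 = [meE j, meE i])) meDictA
      = meLabels.get? (i, j) := by
  decide

theorem meF_known_mem (e : String) (h : meF e ≠ -1) :
    meF e ∈ ([0, 1, 2, 3, 4, 5, 6, 7] : List Int) := by
  rcases meF_cases e with h' | h'
  · exact absurd h' h
  · revert h'; unfold meBaseList; intro h'; fin_cases h' <;> simp_all <;> decide

theorem meScanG_false : ∀ es : List (String × List String),
    meScanG (fun _ => false) es = none := by
  intro es
  induction es with
  | nil => rfl
  | cons kp rest ih => simp [meScanG, ih]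

-- if some string of top2 is not a primary emotion, A's scan finds no match
theorem meA_fb_of_unknown (top2 : List String) (hU : ∃ e ∈ top2, meF e = -1) :
    meScan top2 meDictA = PySem.List.pyGetD top2 0 "" := by
  rw [meScan_congr top2 (fun _ => false) meDictA ?_, meScanG_false]
  · rfl
  intro kp hkp
  obtain ⟨a, b, hp, _, ha, hb, _⟩ := meShape kp hkp
  cases hq : PySem.Set.equal (PySem.Set.ofList top2) (PySem.Set.ofList kp.2) with
  | false => rfl
  | true =>
    exfalso
    obtain ⟨e, he, hfe⟩ := hU
    have hmem := ((PySem.Set.equal_iff _ _).mp hq e).1 (by simpa [PySem.Set.mem_ofList] using he)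
    rw [hp] at hmem
    simp [PySem.Set.mem_ofList] at hmem
    rcases hmem with rfl | rfl
    · exact ha hfe
    · exact hb hfe

-- if the distinct-code set has size other than 2, A's scan finds no match
theorem meA_fb_of_len (top2 : List String) (hlen : (meT top2).length ≠ 2) :
    meScan top2 meDictA = PySem.List.pyGetD top2 0 "" := by
  rw [meScan_congr top2 (fun _ => false) meDictA ?_, meScanG_false]
  · rfl
  intro kp hkp
  obtain ⟨a, b, hp, _, _, _, hfab⟩ := meShape kp hkp
  cases hq : PySem.Set.equal (PySem.Set.ofList top2) (PySem.Set.ofList kp.2) with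
  | false => rfl
  | true =>
    exfalso
    apply hlen
    have hq' := (PySem.Set.equal_iff _ _).mp hq
    rw [hp] at hq'
    have hmem : ∀ x, x ∈ top2 ↔ (x = a ∨ x = b) := by
      intro x
      have := hq' x
      simpa [PySem.Set.mem_ofList] using this
    have hperm : (meT top2).Perm [meF a, meF b] := by
      rw [List.perm_ext_iff_of_nodup (show (meT top2).Nodup from PySem.Set.nodup_ofList _) (by simp [hfab])]
      intro y
      rw [mem_meT]
      constructor
      · rintro ⟨e, he, rfl⟩
        rcases (hmem e).1 he with rfl | rfl <;> simp
      · intro hy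
        rcases List.mem_pair.mp hy with rfl | rfl
        · exact ⟨a, (hmem a).2 (Or.inl rfl), rfl⟩
        · exact ⟨b, (hmem b).2 (Or.inr rfl), rfl⟩
    simpa using hperm.length_eq

theorem meKey_lemma (top2 : List String) :
    meScan top2 meDictA =
      match PySem.List.sorted (meT top2) (fun x => x) false with
      | [i, j] =>
          if i ≠ -1 then meLabels.getD (i, j) (PySem.List.pyGetD top2 0 "")
          else PySem.List.pyGetD top2 0 ""
      | _ => PySem.List.pyGetD top2 0 "" := by
  by_cases hU : ∃ e ∈ top2, meF e = -1
  · rw [meA_fb_of_unknown top2 hU]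
    rcases hidx : PySem.List.sorted (meT top2) (fun x => x) false with _ | ⟨i, _ | ⟨j, rest⟩⟩
    · rfl
    · rfl
    cases rest with
    | cons k t => rfl
    | nil =>
      -- idx = [i, j]; since -1 ∈ meT and i is minimal, i = -1
      obtain ⟨e, he, hfe⟩ := hU
      have hm1 : (-1 : Int) ∈ meT top2 := (mem_meT top2 (-1)).2 ⟨e, he, hfe⟩
      have hhead := PySem.List.key_head_sorted_le _ _ hidx
      have hile : i ≤ -1 ∨ i = -1 := by
        have : (-1 : Int) ∈ ([i, j] : List Int) := by
          rw [← hidx, PySem.List.mem_sorted]; exact hm1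
        rcases List.mem_pair.mp this with h | h
        · right; omega
        · left; subst h; exact hhead _ hm1
      have hige : -1 ≤ i := by
        have hiT : i ∈ meT top2 := by
          rw [← PySem.List.mem_sorted (meT top2) (fun x => x) false i, hidx]; simp
        obtain ⟨e', _, hfe'⟩ := (mem_meT top2 i).1 hiT
        rw [← hfe']; exact meF_ge e'
      have : i = -1 := by omega
      simp [this]
  · push Not at hU
    rcases hidx : PySem.List.sorted (meT top2) (fun x => x) false with _ | ⟨i, _ | ⟨j, rest⟩⟩
    · exact meA_fb_of_len top2 (by
        have := PySem.List.length_sorted (meT top2) (fun x => x) false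
        rw [hidx] at this; simp at this; omega)
    · exact meA_fb_of_len top2 (by
        have := PySem.List.length_sorted (meT top2) (fun x => x) false
        rw [hidx] at this; simp at this; omega)
    cases rest with
    | cons k t =>
      exact meA_fb_of_len top2 (by
        have := PySem.List.length_sorted (meT top2) (fun x => x) false
        rw [hidx] at this; simp at this; omega)
    | nil =>
      -- idx = [i, j], all codes known: set(top2) = {meE i, meE j}
      have hij : i < j := by
        have h := PySem.List.sorted_ofList_pairwise_lt (top2.map meF)
        rw [show PySem.Set.ofList (top2.map meF) = meT top2 from rfl, hidx] at h
        simp at h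
        exact h
      have hiT : i ∈ meT top2 := by
        rw [← PySem.List.mem_sorted (meT top2) (fun x => x) false i, hidx]; simp
      have hjT : j ∈ meT top2 := by
        rw [← PySem.List.mem_sorted (meT top2) (fun x => x) false j, hidx]; simp
      obtain ⟨ei, hei, hfei⟩ := (mem_meT top2 i).1 hiT
      obtain ⟨ej, hej, hfej⟩ := (mem_meT top2 j).1 hjT
      have hi1 : meF ei ≠ -1 := hU ei hei
      have hj1 : meF ej ≠ -1 := hU ej hej
      have hEi : meE i = ei := by rw [← hfei]; exact meE_meF ei hi1
      have hEj : meE j = ej := by rw [← hfej]; exact meE_meF ej hj1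
      have hicodes : i ∈ ([0, 1, 2, 3, 4, 5, 6, 7] : List Int) := by
        rw [← hfei]; exact meF_known_mem ei hi1
      have hjcodes : j ∈ ([0, 1, 2, 3, 4, 5, 6, 7] : List Int) := by
        rw [← hfej]; exact meF_known_mem ej hj1
      have hAB : meE i ≠ meE j := by
        rw [hEi, hEj]; intro h
        rw [h, hfej] at hfei; omega
      have H1 : ∀ x ∈ top2, x = meE i ∨ x = meE j := by
        intro x hx
        have hxT : meF x ∈ meT top2 := (mem_meT top2 (meF x)).2 ⟨x, hx, rfl⟩
        have : meF x ∈ ([i, j] : List Int) := by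
          rw [← hidx, PySem.List.mem_sorted]; exact hxT
        have hx1 := hU x hx
        rcases List.mem_pair.mp this with h | h
        · left; rw [← meE_meF x hx1, h]
        · right; rw [← meE_meF x hx1, h]
      have H2 : meE i ∈ top2 := by rw [hEi]; exact hei
      have H3 : meE j ∈ top2 := by rw [hEj]; exact hej
      rw [meScan_congr top2
            (fun kp => decide (kp.2 = [meE i, meE j] ∨ kp.2 = [meE j, meE i])) meDictA ?_]
      · rw [meMain i hicodes j hjcodes hij]
        have hine : i ≠ -1 := by fin_cases hicodes <;> decide
        simp [hine, PySem.Dict.getD_eq_get?_getD]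
      intro kp hkp
      obtain ⟨a, b, hp, hab, _, _, _⟩ := meShape kp hkp
      rw [hp, meCond_char top2 a b (meE i) (meE j) hAB H1 H2 H3]
      simp only [hp, List.cons.injEq, and_true]
  
-- ===== VERDICT (by name: the statement is the Claim_ definition above) =====
theorem mixed_emotion_spec : Claim_equal_mixed_emotion := by
  intro top2 _ _
  unfold Spec_mixed_emotion mixed_emotion mixed_emotion_alt
  exact meKey_lemma top2
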